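-- pv_equiv track=rewrite | github.com/IsHYuhi/AtCoder_Python | ABC/ABC099/C.py | check
-- ===== SOURCE A (Python) =====
-- def check(n, a):
--     count = 0
--     o = a*n
--     start = n
--
--     while start<=o:
--         start *= n
--     start //= n
--
--     while start > 1:
--         if o >= start:
--             c = o//start
--             o -= c*start
--             count += c
--         start //= n
--
--     return count
-- ===== SOURCE B (Python) =====
-- def check(n, a):
--     o = a * n
--     count = 0
--     while o > 0:
--         count += o % n
--         o //= n
--     return count
-- ===== Notes on version B (the rewrite author's own statement) =====
-- stated objective: simpler
-- what changed: Replaces the power-finding loop plus most-significant-first subtraction with the standard least-significant-digit loop (o % n, o //= n), removing the start variable entirely.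
import Mathlib
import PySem

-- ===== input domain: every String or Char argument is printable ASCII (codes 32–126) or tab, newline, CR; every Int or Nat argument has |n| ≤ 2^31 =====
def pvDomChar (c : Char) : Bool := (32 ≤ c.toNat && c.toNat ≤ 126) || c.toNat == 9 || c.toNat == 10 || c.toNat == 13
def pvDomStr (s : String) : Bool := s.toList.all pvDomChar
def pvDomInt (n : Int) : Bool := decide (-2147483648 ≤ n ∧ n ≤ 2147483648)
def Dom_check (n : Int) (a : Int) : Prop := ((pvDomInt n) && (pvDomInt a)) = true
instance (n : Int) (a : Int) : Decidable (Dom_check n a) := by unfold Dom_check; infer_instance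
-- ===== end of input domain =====

-- B replaces A's power-finding loop plus most-significant-digit-first subtraction by the
-- standard least-significant-digit loop (o % n, o //= n); same value, one pass, no `start`.

-- ===== PORT A =====
-- first while loop of A: `while start <= o: start *= n` (fuel only makes it total)
def checkLoop1 (n o : Int) : Nat → Int → Int
  | 0, start => start
  | f + 1, start => if start ≤ o then checkLoop1 n o f (start * n) else start

-- second while loop of A: `while start > 1: …` (state: start, o, count)
def checkLoop2 (n : Int) : Nat → Int → Int → Int → Int
  | 0, _, _, count => count
  | f + 1, start, o, count =>
    if start > 1 then
      if o ≥ start then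
        checkLoop2 n f (PySem.Int.floordiv start n)
          (o - PySem.Int.floordiv o start * start)
          (count + PySem.Int.floordiv o start)
      else checkLoop2 n f (PySem.Int.floordiv start n) o count
    else count

def check (n : Int) (a : Int) : Int :=
  let o := a * n
  let fuel := o.natAbs + 2
  let start := checkLoop1 n o fuel n
  let start2 := PySem.Int.floordiv start n
  checkLoop2 n fuel start2 o 0

-- ===== PORT B =====
-- `while o > 0: count += o % n; o //= n` (fuel only makes it total)
def altLoop (n : Int) : Nat → Int → Int → Int
  | 0, _, count => count
  | f + 1, o, count =>
    if o > 0 then altLoop n f (PySem.Int.floordiv o n) (count + PySem.Int.mod o n)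
    else count

def check_alt (n : Int) (a : Int) : Int :=
  altLoop n ((a * n).natAbs + 2) (a * n) 0

-- ===== PRECONDITION & SPEC =====
-- Pre_ is exactly the set of inputs on which the Python A terminates (returns): A's first
-- while loop runs forever for n = 0, for n = 1 with a ≥ 1, and for n = -1 with a ≤ -1.
def Pre_check (n : Int) (a : Int) : Prop :=
  2 ≤ n ∨ n ≤ -2 ∨ (n = 1 ∧ a ≤ 0) ∨ (n = -1 ∧ 0 ≤ a)
instance (n : Int) (a : Int) : Decidable (Pre_check n a) := by unfold Pre_check; infer_instance

def pvWitness_check : Int × Int := (10, 123)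

def Spec_check (n : Int) (a : Int) (out : Int) : Prop := out = check_alt n a
instance (n : Int) (a : Int) (out : Int) : Decidable (Spec_check n a out) := by
  unfold Spec_check; infer_instance

-- ===== CLAIM (what is proved, stated in full; the proofs are below) =====
def Claim_equal_check : Prop :=
  ∀ (n : Int) (a : Int), Dom_check n a → Pre_check n a → Spec_check n a (check n a)

-- ===== LEMMAS AND PROOFS =====

theorem floordiv_eq_fdiv : PySem.Int.floordiv = Int.fdiv := rfl
theorem check_def (n a : Int) : check n a =
    checkLoop2 n ((a * n).natAbs + 2)
      (PySem.Int.floordiv (checkLoop1 n (a * n) ((a * n).natAbs + 2) n) n) (a * n) 0 := rfl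

/-- base-N digit sum (proof-side characterisation both ports are reduced to) -/
def digSum (N : Nat) (m : Nat) : Nat :=
  if h : 2 ≤ N ∧ 0 < m then m % N + digSum N (m / N) else 0
termination_by m
decreasing_by exact Nat.div_lt_self h.2 (by omega)

theorem digSum_zero (N : Nat) : digSum N 0 = 0 := by
  unfold digSum; simp

theorem digSum_pos {N m : Nat} (hN : 2 ≤ N) (hm : 0 < m) :
    digSum N m = m % N + digSum N (m / N) := by
  rw [digSum, dif_pos ⟨hN, hm⟩]

theorem digSum_of_lt {N m : Nat} (hN : 2 ≤ N) (hm : m < N) : digSum N m = m := by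
  rcases Nat.eq_zero_or_pos m with h | h
  · simp [h, digSum_zero]
  · rw [digSum_pos hN h, Nat.mod_eq_of_lt hm, Nat.div_eq_of_lt hm, digSum_zero]
    omega

theorem digSum_split {N : Nat} (hN : 2 ≤ N) :
    ∀ (j m : Nat), m < N ^ (j + 1) →
      digSum N m = m / N ^ j + digSum N (m % N ^ j) := by
  intro j
  induction j with
  | zero =>
    intro m hm
    have hm' : m < N := by simpa using hm
    simp only [pow_zero]
    rw [Nat.div_one, Nat.mod_one, digSum_zero, digSum_of_lt hN hm']
    omega
  | succ j ih =>
    intro m hm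
    rcases Nat.eq_zero_or_pos m with h0 | h0
    · simp [h0, Nat.zero_mod, digSum_zero]
    have hdivlt : m / N < N ^ (j + 1) := by
      rw [Nat.div_lt_iff_lt_mul (by omega)]
      calc m < N ^ (j + 2) := hm
        _ = N ^ (j + 1) * N := by ring
    have h1 : digSum N m = m % N + digSum N (m / N) := digSum_pos hN h0
    have h2 := ih (m / N) hdivlt
    have h3 : m / N / N ^ j = m / N ^ (j + 1) := by
      rw [Nat.div_div_eq_div_mul, pow_succ']
    have h4 : m / N % N ^ j = m % N ^ (j + 1) / N := by
      have := Nat.mod_mul_right_div_self m N (N ^ j)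
      rw [← pow_succ'] at this
      omega
    have h5 : m % N = m % N ^ (j + 1) % N :=
      (Nat.mod_mod_of_dvd m (dvd_pow_self N (by omega))).symm
    rcases Nat.eq_zero_or_pos (m % N ^ (j + 1)) with hz | hz
    · rw [h1, h2, h3, h4, h5, hz]
      simp [digSum_zero]
    · have h6 : digSum N (m % N ^ (j + 1)) =
          m % N ^ (j + 1) % N + digSum N (m % N ^ (j + 1) / N) := digSum_pos hN hz
      rw [h1, h2, h3, h4, h5, h6]
      omega

-- B's loop computes the digit sum (n ≥ 2, o ≥ 0)
theorem altLoop_spec {N : Nat} (hN : 2 ≤ N) :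
    ∀ (f : Nat) (m : Nat) (count : Int), m < 2 ^ f →
      altLoop (N : Int) f (m : Int) count = count + (digSum N m : Int) := by
  intro f
  induction f with
  | zero =>
    intro m count hm
    interval_cases m
    simp [altLoop, digSum_zero]
  | succ f ih =>
    intro m count hm
    rcases Nat.eq_zero_or_pos m with h0 | h0
    · simp [h0, altLoop, digSum_zero]
    have hpos : (0 : Int) < (m : Int) := by exact_mod_cast h0
    have hdivlt : m / N < 2 ^ f := by
      rw [Nat.div_lt_iff_lt_mul (by omega)]
      calc m < 2 ^ (f + 1) := hm
        _ = 2 ^ f * 2 := by ring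
        _ ≤ 2 ^ f * N := by
            exact Nat.mul_le_mul_left _ hN
    have hfd : PySem.Int.floordiv (m : Int) (N : Int) = ((m / N : Nat) : Int) :=
      PySem.Int.floordiv_natCast m N
    have hmd : PySem.Int.mod (m : Int) (N : Int) = ((m % N : Nat) : Int) :=
      PySem.Int.mod_natCast m N
    have hds : digSum N m = m % N + digSum N (m / N) := digSum_pos hN h0
    rw [altLoop, if_pos hpos, hfd, hmd, ih (m / N) _ hdivlt, hds]
    push_cast; ring

-- A's second loop: from start = N^j with o < N^(j+1) it adds all digits above position 0
theorem checkLoop2_spec {N : Nat} (hN : 2 ≤ N) :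
    ∀ (j f : Nat) (m : Nat) (count : Int), j ≤ f → m < N ^ (j + 1) →
      checkLoop2 (N : Int) f ((N : Int) ^ j) (m : Int) count =
        count + (digSum N m : Int) - ((m % N : Nat) : Int) := by
  intro j
  induction j with
  | zero =>
    intro f m count _ hm
    have h1 : digSum N m = m := digSum_of_lt hN (by simpa using hm)
    have h2 : m % N = m := Nat.mod_eq_of_lt (by simpa using hm)
    cases f with
    | zero => simp [checkLoop2, h1, h2]
    | succ f => simp [checkLoop2, h1, h2]
  | succ j ih =>
    intro f m count hjf hm
    cases f with
    | zero => omega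
    | succ f =>
      have hstart : (1 : Int) < (N : Int) ^ (j + 1) := by
        have h2N : (2 : Int) ≤ (N : Int) := by exact_mod_cast hN
        have hp : (0 : Int) < (N : Int) ^ j := pow_pos (by omega) j
        calc (1 : Int) < (N : Int) ^ j * (N : Int) := by nlinarith
          _ = (N : Int) ^ (j + 1) := (pow_succ _ _).symm
      have hcast : ((N : Int)) ^ (j + 1) = ((N ^ (j + 1) : Nat) : Int) := by push_cast; ring
      have hdivN : N ^ (j + 1) / N = N ^ j := by
        have hNpos : 0 < N := by omega
        rw [pow_succ]
        exact Nat.mul_div_cancel _ hNpos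
      have hfd2 : PySem.Int.floordiv ((N : Int) ^ (j + 1)) (N : Int) = (N : Int) ^ j := by
        rw [hcast, PySem.Int.floordiv_natCast, hdivN]
        push_cast
        ring
      rw [checkLoop2, if_pos hstart]
      by_cases hge : (m : Int) ≥ (N : Int) ^ (j + 1)
      · rw [if_pos hge]
        have hfd : PySem.Int.floordiv (m : Int) ((N : Int) ^ (j + 1)) =
            ((m / N ^ (j + 1) : Nat) : Int) := by
          rw [hcast]; exact PySem.Int.floordiv_natCast m _
        have hsub : (m : Int) - ((m / N ^ (j + 1) : Nat) : Int) * (N : Int) ^ (j + 1) =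
            ((m % N ^ (j + 1) : Nat) : Int) := by
          rw [hcast]
          have := Nat.div_add_mod m (N ^ (j + 1))
          push_cast
          nlinarith [this]
        have hmodlt : m % N ^ (j + 1) < N ^ (j + 1) :=
          Nat.mod_lt _ (by positivity)
        rw [hfd, hfd2, hsub, ih f (m % N ^ (j + 1)) _ (by omega) hmodlt]
        have hsplit := digSum_split hN (j + 1) m hm
        have hmm : m % N ^ (j + 1) % N = m % N :=
          Nat.mod_mod_of_dvd m (dvd_pow_self N (by omega))
        rw [hsplit, hmm]
        push_cast; ring
      · rw [if_neg hge, hfd2]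
        have hmlt : m < N ^ (j + 1) := by
          by_contra h
          exact hge (by exact_mod_cast Nat.le_of_not_lt h)
        exact ih f m count (by omega) hmlt

-- A's first loop (n ≥ 2): returns the least power n^k > o reached from n^j
theorem checkLoop1_pos {n o : Int} (hn : 2 ≤ n) :
    ∀ (f j : Nat), 1 ≤ j → o < n ^ (j + f) →
      ∃ k, j ≤ k ∧ o < n ^ k ∧ (k = j ∨ n ^ (k - 1) ≤ o) ∧
        checkLoop1 n o (f + 1) (n ^ j) = n ^ k := by
  intro f
  induction f with
  | zero =>
    intro j hj ho
    refine ⟨j, le_refl j, by simpa using ho, Or.inl rfl, ?_⟩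
    rw [checkLoop1, if_neg (by simpa using not_le.mpr ho)]
  | succ f ih =>
    intro j hj ho
    by_cases hle : n ^ j ≤ o
    · obtain ⟨k, hk1, hk2, hk3, hk4⟩ := ih (j + 1) (by omega) (by
        have : j + 1 + f = j + (f + 1) := by ring
        rw [this]; exact ho)
      refine ⟨k, by omega, hk2, ?_, ?_⟩
      · right
        rcases hk3 with h | h
        · subst h; simpa using hle
        · exact h
      · rw [checkLoop1, if_pos hle, ← pow_succ]
        exact hk4
    · refine ⟨j, le_refl j, not_le.mp hle, Or.inl rfl, ?_⟩
      rw [checkLoop1, if_neg hle]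

-- A's first loop (n ≤ -2, o > 0): returns some n^k > o with k ≥ j
theorem checkLoop1_neg {n o : Int} (hn : n ≤ -2) (ho : 0 < o) :
    ∀ (f j : Nat), 1 ≤ j → o < (-n) ^ (j + f) →
      ∃ k, j ≤ k ∧ o < n ^ k ∧ checkLoop1 n o (f + 1) (n ^ j) = n ^ k := by
  intro f
  induction f with
  | zero =>
    intro j hj ho2
    simp only [Nat.add_zero] at ho2
    by_cases hle : n ^ j ≤ o
    · -- n^j ≤ o < (-n)^j forces j odd; then n^(j+1) = (-n)^(j+1) > (-n)^j > o
      have hodd : Odd j := by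
        rcases Nat.even_or_odd j with he | hodd
        · exfalso
          rw [he.neg_pow] at ho2
          omega
        · exact hodd
      have heven : Even (j + 1) := by
        rcases hodd with ⟨t, ht⟩
        exact ⟨t + 1, by omega⟩
      have hpow : n ^ (j + 1) = (-n) ^ (j + 1) := (heven.neg_pow n).symm
      have hmono : (-n) ^ j < (-n) ^ (j + 1) := by
        have h2 : (2 : Int) ≤ -n := by omega
        have := pow_lt_pow_right₀ (by omega : (1 : Int) < -n) (by omega : j < j + 1)
        exact this
      refine ⟨j + 1, by omega, by rw [hpow]; omega, ?_⟩
      rw [checkLoop1, if_pos hle, checkLoop1, ← pow_succ]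
    · refine ⟨j, le_refl j, not_le.mp hle, ?_⟩
      rw [checkLoop1, if_neg hle]
  | succ f ih =>
    intro j hj ho2
    by_cases hle : n ^ j ≤ o
    · obtain ⟨k, hk1, hk2, hk3⟩ := ih (j + 1) (by omega) (by
        have : j + 1 + f = j + (f + 1) := by ring
        rw [this]; exact ho2)
      refine ⟨k, by omega, hk2, ?_⟩
      rw [checkLoop1, if_pos hle, ← pow_succ]
      exact hk3
    · refine ⟨j, le_refl j, not_le.mp hle, ?_⟩
      rw [checkLoop1, if_neg hle]

theorem natAbs_lt_two_pow (m : Nat) (e : Nat) (h : m ≤ e) : (m : Int) < 2 ^ (e + 2) := by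
  have h1 : m < 2 ^ m := Nat.lt_two_pow_self
  have h2 : (2 : Nat) ^ m ≤ 2 ^ (e + 2) := Nat.pow_le_pow_right (by omega) (by omega)
  exact_mod_cast lt_of_lt_of_le h1 h2

-- main case: n ≥ 2, a ≥ 1
theorem check_eq_digSum {n a : Int} (hn : 2 ≤ n) (ha : 1 ≤ a) :
    check n a = check_alt n a := by
  set N := n.toNat with hNdef
  have hnN : n = (N : Int) := by simp [hNdef, Int.toNat_of_nonneg (by omega : (0:Int) ≤ n)]
  have hN2 : 2 ≤ N := by omega
  set o := a * n with hodef
  have hopos : 0 < o := mul_pos (by omega) (by omega)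
  set m := o.toNat with hmdef
  have hom : o = (m : Int) := by simp [hmdef, Int.toNat_of_nonneg (by omega : (0:Int) ≤ o)]
  have hno : n ≤ o := by nlinarith
  -- loop 1
  have hball : o < n ^ (1 + (m + 1)) := by
    have hm2 : (m : Int) < 2 ^ (m + 2) := natAbs_lt_two_pow m m (le_refl m)
    have h2n : (2 : Int) ^ (m + 2) ≤ n ^ (m + 2) := pow_le_pow_left₀ (by norm_num) hn _
    have h12 : 1 + (m + 1) = m + 2 := by omega
    rw [h12, hom]
    linarith
  obtain ⟨k, hk1, hk2, hk3, hk4⟩ := checkLoop1_pos hn (m + 1) 1 (le_refl 1) hball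
  have hklow : n ^ (k - 1) ≤ o := by
    rcases hk3 with h | h
    · exfalso; subst h; rw [pow_one] at hk2; omega
    · exact h
  have hk2' : 2 ≤ k := by
    by_contra hcon
    have hk1' : k = 1 := by omega
    subst hk1'
    rw [pow_one] at hk2; omega
  -- start //= n
  have hdiv : PySem.Int.floordiv (n ^ k) n = n ^ (k - 1) := by
    rw [floordiv_eq_fdiv]
    have : n ^ k = n * n ^ (k - 1) := by
      rw [← pow_succ']
      congr 1
      omega
    rw [this, Int.mul_fdiv_cancel_left _ (by omega)]
  -- fuel for loop 2 and bounds as naturals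
  have hk1m : k - 1 ≤ m := by
    have h2pow : (2 : Int) ^ (k - 1) ≤ n ^ (k - 1) := pow_le_pow_left₀ (by norm_num) hn _
    have hlt : ((k - 1 : Nat) : Int) < 2 ^ (k - 1) := by
      have := Nat.lt_two_pow_self (n := k - 1)
      exact_mod_cast this
    have hklow' : n ^ (k - 1) ≤ (m : Int) := by rw [← hom]; exact hklow
    have hfin : ((k - 1 : Nat) : Int) < (m : Int) := by linarith
    have : k - 1 < m := by exact_mod_cast hfin
    omega
  have hmlt : m < N ^ (k - 1 + 1) := by
    have hkk : k - 1 + 1 = k := by omega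
    rw [hkk]
    have h1 : (m : Int) < ((N ^ k : Nat) : Int) := by
      rw [← hom]
      calc o < n ^ k := hk2
        _ = ((N ^ k : Nat) : Int) := by rw [hnN]; push_cast; ring
    exact_mod_cast h1
  have hmodz : m % N = 0 := by
    have hdvd : N ∣ m := by
      have hdvd' : (N : Int) ∣ (m : Int) := by
        rw [← hom, ← hnN, hodef]
        exact dvd_mul_left n a
      exact_mod_cast hdvd'
    omega
  -- assemble A
  have habs : o.natAbs = m := by omega
  have hA : check n a = (digSum N m : Int) := by
    rw [check_def, ← hodef, habs]
    have e1 : checkLoop1 n o (m + 2) n = n ^ k := by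
      have := hk4
      rw [pow_one] at this
      exact this
    rw [e1, hdiv]
    have e2 : checkLoop2 n (m + 2) (n ^ (k - 1)) o 0 =
        0 + (digSum N m : Int) - ((m % N : Nat) : Int) := by
      rw [hnN, hom]
      exact checkLoop2_spec hN2 (k - 1) (m + 2) m 0 (by omega) hmlt
    rw [e2, hmodz]
    simp
  -- assemble B
  have hB : check_alt n a = (digSum N m : Int) := by
    unfold check_alt
    rw [← hodef, habs, hnN, hom]
    rw [altLoop_spec hN2 (m + 2) m 0 (by
      have := Nat.lt_two_pow_self (n := m)
      calc m < 2 ^ m := this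
        _ ≤ 2 ^ (m + 2) := Nat.pow_le_pow_right (by omega) (by omega))]
    simp
  rw [hA, hB]

-- small-step lemmas for the degenerate (result 0) cases

theorem loop1_stop {n o : Int} (f : Nat) (start : Int) (h : ¬ start ≤ o) :
    checkLoop1 n o (f + 1) start = start := by
  rw [checkLoop1, if_neg h]

theorem loop1_step {n o : Int} (f : Nat) (start : Int) (h : start ≤ o) :
    checkLoop1 n o (f + 1) start = checkLoop1 n o f (start * n) := by
  rw [checkLoop1, if_pos h]

theorem loop2_stop {n : Int} (f : Nat) (start o count : Int) (h : ¬ start > 1) :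
    checkLoop2 n (f + 1) start o count = count := by
  rw [checkLoop2, if_neg h]

theorem altLoop_stop {n : Int} (f : Nat) (o count : Int) (h : ¬ o > 0) :
    altLoop n (f + 1) o count = count := by
  rw [altLoop, if_neg h]

theorem altLoop_step {n : Int} (f : Nat) (o count : Int) (h : o > 0) :
    altLoop n (f + 1) o count =
      altLoop n f (PySem.Int.floordiv o n) (count + PySem.Int.mod o n) := by
  rw [altLoop, if_pos h]

theorem check_alt_of_nonpos {n a : Int} (h : a * n ≤ 0) : check_alt n a = 0 := by
  unfold check_alt
  exact altLoop_stop ((a * n).natAbs + 1) (a * n) 0 (by omega)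

-- A returns 0 when its first loop stops immediately (start//n becomes 1, n ≠ 0)
theorem check0_stop0 {n a : Int} (hne : n ≠ 0) (h1 : ¬ n ≤ a * n) : check n a = 0 := by
  rw [check_def]
  have e1 : checkLoop1 n (a * n) ((a * n).natAbs + 2) n = n :=
    loop1_stop ((a * n).natAbs + 1) n h1
  have e2 : PySem.Int.floordiv n n = 1 := by
    rw [floordiv_eq_fdiv]
    have := Int.mul_fdiv_cancel_left (a := n) (b := 1) hne
    simpa using this
  rw [e1, e2]
  exact loop2_stop ((a * n).natAbs + 1) 1 (a * n) 0 (by norm_num)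

-- A returns 0 when its first loop does exactly one step and n ≤ 1
theorem check0_stop1 {n a : Int} (hne : n ≠ 0) (hles : ¬ n > 1)
    (h1 : n ≤ a * n) (h2 : ¬ n * n ≤ a * n) : check n a = 0 := by
  rw [check_def]
  have e1 : checkLoop1 n (a * n) ((a * n).natAbs + 2) n = n * n := by
    have s1 : checkLoop1 n (a * n) ((a * n).natAbs + 1 + 1) n =
        checkLoop1 n (a * n) ((a * n).natAbs + 1) (n * n) := loop1_step _ n h1
    have s2 : checkLoop1 n (a * n) ((a * n).natAbs + 1) (n * n) = n * n :=
      loop1_stop ((a * n).natAbs) (n * n) h2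
    exact s1.trans s2
  have e2 : PySem.Int.floordiv (n * n) n = n := by
    rw [floordiv_eq_fdiv]
    exact Int.mul_fdiv_cancel_left n hne
  rw [e1, e2]
  exact loop2_stop ((a * n).natAbs + 1) n (a * n) 0 hles

-- n ≤ -2, a ≤ -1 : A's first loop climbs to an even power of n, then returns 0
theorem check_neg_neg {n a : Int} (hn : n ≤ -2) (ha : a ≤ -1) : check n a = 0 := by
  have hpos : 0 < a * n := mul_pos_of_neg_of_neg (by omega) (by omega)
  set o := a * n with hodef
  set m := o.toNat with hmdef
  have hom : o = (m : Int) := by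
    simp [hmdef, Int.toNat_of_nonneg (by omega : (0:Int) ≤ o)]
  have hb : o < (-n) ^ (1 + (m + 1)) := by
    have hm2 : (m : Int) < 2 ^ (m + 2) := natAbs_lt_two_pow m m (le_refl m)
    have h2n : (2 : Int) ^ (m + 2) ≤ (-n) ^ (m + 2) :=
      pow_le_pow_left₀ (by norm_num) (by omega) _
    have h12 : 1 + (m + 1) = m + 2 := by omega
    rw [h12, hom]
    linarith
  obtain ⟨k, hk1, hk2, hk4⟩ := checkLoop1_neg hn hpos (m + 1) 1 (le_refl 1) hb
  have hke : Even k := by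
    rcases Nat.even_or_odd k with he | hodd
    · exact he
    · exfalso
      have : n ^ k < 0 := hodd.pow_neg (by omega)
      omega
  have hk2' : 2 ≤ k := by
    rcases hke with ⟨t, ht⟩
    omega
  have hneg : n ^ (k - 1) < 0 := by
    have hodd : Odd (k - 1) := by
      rcases hke with ⟨t, ht⟩
      exact ⟨t - 1, by omega⟩
    exact hodd.pow_neg (by omega)
  have hdiv : PySem.Int.floordiv (n ^ k) n = n ^ (k - 1) := by
    rw [floordiv_eq_fdiv]
    have he : n ^ k = n * n ^ (k - 1) := by
      rw [← pow_succ']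
      congr 1
      omega
    rw [he, Int.mul_fdiv_cancel_left _ (by omega)]
  have habs : o.natAbs = m := by omega
  rw [check_def, ← hodef, habs]
  have e1 : checkLoop1 n o (m + 2) n = n ^ k := by
    have := hk4
    rw [pow_one] at this
    exact this
  rw [e1, hdiv]
  exact loop2_stop (m + 1) (n ^ (k - 1)) o 0 (by omega)

-- n ≤ -2, a ≤ -1 : B does one step (a*n % n = 0, a*n // n = a) and stops
theorem check_alt_neg {n a : Int} (hn : n ≤ -2) (ha : a ≤ -1) : check_alt n a = 0 := by
  have hpos : 0 < a * n := mul_pos_of_neg_of_neg (by omega) (by omega)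
  unfold check_alt
  have s1 := altLoop_step (n := n) ((a * n).natAbs + 1) (a * n) 0 hpos
  have hmod : PySem.Int.mod (a * n) n = 0 :=
    (PySem.Int.mod_eq_zero_iff_dvd _ _).mpr (dvd_mul_left n a)
  have hdiv : PySem.Int.floordiv (a * n) n = a := by
    rw [floordiv_eq_fdiv]
    exact Int.mul_fdiv_cancel a (by omega)
  rw [s1, hmod, hdiv, add_zero]
  exact altLoop_stop ((a * n).natAbs) a 0 (by omega)

-- ===== VERDICT (by name: the statement is the Claim_ definition above) =====
theorem check_spec : Claim_equal_check := by
  unfold Claim_equal_check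
  intro n a _ hpre
  unfold Spec_check
  rcases hpre with hn | hn | ⟨hn, ha⟩ | ⟨hn, ha⟩
  · -- n ≥ 2
    rcases le_or_gt a 0 with ha | ha
    · rw [check0_stop0 (by omega) (by nlinarith), check_alt_of_nonpos (by nlinarith)]
    · exact check_eq_digSum hn (by omega)
  · -- n ≤ -2
    rcases le_or_gt a (-1) with ha | ha
    · rw [check_neg_neg hn ha, check_alt_neg hn ha]
    · have ha0 : 0 ≤ a := by omega
      have hB : check_alt n a = 0 := check_alt_of_nonpos (by nlinarith)
      rcases lt_or_ge a 2 with ha2 | ha2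
      · -- a = 0 or a = 1
        have hA : check n a = 0 := by
          refine check0_stop1 (by omega) (by omega) (by nlinarith) ?_
          have hnn : 0 < n * n := mul_pos_of_neg_of_neg (by omega) (by omega)
          nlinarith
        rw [hA, hB]
      · -- a ≥ 2
        rw [check0_stop0 (by omega) (by nlinarith), hB]
  · -- n = 1, a ≤ 0
    subst hn
    rw [check0_stop0 (by omega) (by omega), check_alt_of_nonpos (by omega)]
  · -- n = -1, a ≥ 0
    subst hn
    have hB : check_alt (-1) a = 0 := check_alt_of_nonpos (by omega)
    rcases lt_or_ge a 2 with ha2 | ha2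
    · rw [check0_stop1 (by omega) (by omega) (by omega) (by omega), hB]
    · rw [check0_stop0 (by omega) (by omega), hB]
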